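-- pv_equiv track=rewrite | github.com/TlawsonVMG/ConTech | ridgeflow/ridgeflow/services/worker_pipeline.py | _page_role_from_keyword_counts
-- ===== SOURCE A (Python) =====
-- def _page_role_from_keyword_counts(keyword_counts):
--     role_scores = {}
--     for key, value in keyword_counts.items():
--         if key.startswith("plan:"):
--             role_scores[key.split(":", 1)[1]] = value
--     if not role_scores:
--         return None
--     role_name, score = max(role_scores.items(), key=lambda item: item[1])
--     return role_name if score > 0 else None
-- ===== SOURCE B (Python) =====
-- def _page_role_from_keyword_counts(keyword_counts):
--     best_role = None
--     best_score = None
--     for key, value in keyword_counts.items():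
--         if key.startswith("plan:"):
--             if best_score is None or value > best_score:
--                 best_role = key.split(":", 1)[1]
--                 best_score = value
--     if best_score is not None and best_score > 0:
--         return best_role
--     return None
-- ===== Notes on version B (the rewrite author's own statement) =====
-- stated objective: simpler
-- what changed: Replaces the intermediate role_scores dict plus a separate max() pass by a single loop over keyword_counts.items() maintaining the current best role and score (strict '>' keeps the first maximum, as max does).
import Mathlib
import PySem

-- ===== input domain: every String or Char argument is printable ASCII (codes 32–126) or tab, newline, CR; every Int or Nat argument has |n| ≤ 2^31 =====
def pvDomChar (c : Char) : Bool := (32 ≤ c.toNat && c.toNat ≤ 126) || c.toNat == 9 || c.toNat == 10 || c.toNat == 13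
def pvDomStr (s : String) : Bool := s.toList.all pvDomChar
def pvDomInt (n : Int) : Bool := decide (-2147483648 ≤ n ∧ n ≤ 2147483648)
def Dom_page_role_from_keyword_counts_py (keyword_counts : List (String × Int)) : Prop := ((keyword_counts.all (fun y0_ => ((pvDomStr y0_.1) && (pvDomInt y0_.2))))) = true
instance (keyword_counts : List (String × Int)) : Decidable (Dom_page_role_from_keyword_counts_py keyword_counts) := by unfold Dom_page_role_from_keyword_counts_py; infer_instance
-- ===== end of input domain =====

-- B replaces A's role_scores dict plus a separate max() pass by one loop keeping the running best role/score (simpler, same O(n)).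
-- ===== PORT A =====
-- key.split(":", 1)[1]; the "" fallback is unreachable: both ports take it only when key starts with "plan:"
def pvPlanSuffix (key : String) : String :=
  match PySem.Str.splitMax? key ":" 1 with
  | some (_ :: s :: _) => s
  | _ => ""

def page_role_from_keyword_counts_py (keyword_counts : List (String × Int)) : Option String :=
  let role_scores : PySem.Dict String Int :=
    keyword_counts.foldl
      (fun d kv =>
        if PySem.Str.startswith kv.1 "plan:" then d.insert (pvPlanSuffix kv.1) kv.2 else d)
      PySem.Dict.empty
  if role_scores.items = [] then none
  else
    match PySem.List.max? role_scores.items (fun item => item.2) with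
    | some (role_name, score) => if score > 0 then some role_name else none
    | none => none

-- ===== PORT B =====
def page_role_from_keyword_counts_py_alt (keyword_counts : List (String × Int)) : Option String :=
  let st : Option String × Option Int :=
    keyword_counts.foldl
      (fun st kv =>
        if PySem.Str.startswith kv.1 "plan:" then
          match st.2 with
          | none => (some (pvPlanSuffix kv.1), some kv.2)
          | some b => if kv.2 > b then (some (pvPlanSuffix kv.1), some kv.2) else st
        else st)
      (none, none)
  match st.2 with
  | some s => if s > 0 then st.1 else none
  | none => none

-- ===== PRECONDITION & SPEC =====
-- Pre_ excludes association lists with a repeated key: keyword_counts is a Python dict, so such lists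
-- do not denote a distinct Python input (dict construction collapses them, overwriting in place).
def Pre_page_role_from_keyword_counts_py (keyword_counts : List (String × Int)) : Prop :=
  (keyword_counts.map Prod.fst).Nodup
instance (keyword_counts : List (String × Int)) : Decidable (Pre_page_role_from_keyword_counts_py keyword_counts) := by unfold Pre_page_role_from_keyword_counts_py; infer_instance

def pvWitness_page_role_from_keyword_counts_py : (List (String × Int)) :=
  [("plan:architectural", 3), ("plan:structural", 7), ("other", 9)]

def Spec_page_role_from_keyword_counts_py (keyword_counts : List (String × Int)) (out : Option String) : Prop := out = page_role_from_keyword_counts_py_alt keyword_counts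
instance (keyword_counts : List (String × Int)) (out : Option String) : Decidable (Spec_page_role_from_keyword_counts_py keyword_counts out) := by unfold Spec_page_role_from_keyword_counts_py; infer_instance

-- ===== CLAIM (what is proved, stated in full; the proofs are below) =====
def Claim_equal_page_role_from_keyword_counts_py : Prop := ∀ (keyword_counts : List (String × Int)), Dom_page_role_from_keyword_counts_py keyword_counts → Pre_page_role_from_keyword_counts_py keyword_counts → Spec_page_role_from_keyword_counts_py keyword_counts (page_role_from_keyword_counts_py keyword_counts)

-- ===== LEMMAS AND PROOFS =====

-- The plan entries of the input, as (suffix, value) pairs, in order.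
def pvPlanList (kc : List (String × Int)) : List (String × Int) :=
  kc.filterMap (fun kv =>
    if PySem.Str.startswith kv.1 "plan:" then some (pvPlanSuffix kv.1, kv.2) else none)

theorem pvGo_zero (sep : List Char) (fuel : Nat) (l cur : List Char) (acc : List (List Char)) :
    PySem.Chars.splitOnMax.go sep fuel 0 l cur acc = ((cur.reverse ++ l) :: acc).reverse := by
  cases fuel with
  | zero => rw [PySem.Chars.splitOnMax.go]
  | succ n => cases l with
    | nil => rw [PySem.Chars.splitOnMax.go] <;> simp
    | cons c rest => rw [PySem.Chars.splitOnMax.go] <;> simp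

theorem pvGo_step_ne (fuel m : Nat) (c : Char) (rest cur : List Char) (acc : List (List Char))
    (hm : m ≠ 0) (hc : c ≠ ':') :
    PySem.Chars.splitOnMax.go [':'] (fuel+1) m (c :: rest) cur acc
      = PySem.Chars.splitOnMax.go [':'] fuel m rest (c :: cur) acc := by
  rw [PySem.Chars.splitOnMax.go] <;> simp [hm, List.isPrefixOf, Ne.symm hc]

theorem pvGo_step_colon (fuel m : Nat) (rest cur : List Char) (acc : List (List Char)) (hm : m ≠ 0) :
    PySem.Chars.splitOnMax.go [':'] (fuel+1) m (':' :: rest) cur acc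
      = PySem.Chars.splitOnMax.go [':'] fuel (m-1) rest [] (cur.reverse :: acc) := by
  rw [PySem.Chars.splitOnMax.go] <;> simp [hm, List.isPrefixOf]

theorem pvChars_split (rest : List Char) :
    PySem.Chars.splitOnMax ('p'::'l'::'a'::'n'::':'::rest) [':'] 1 = [['p','l','a','n'], rest] := by
  rw [PySem.Chars.splitOnMax]
  norm_num
  show PySem.Chars.splitOnMax.go [':'] (rest.length + 5 + 1) 1 ('p'::'l'::'a'::'n'::':'::rest) [] [] = _
  rw [show rest.length + 5 + 1 = (rest.length + 5) + 1 from rfl, pvGo_step_ne _ _ _ _ _ _ one_ne_zero (by decide)]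
  rw [show rest.length + 5 = (rest.length + 4) + 1 from rfl, pvGo_step_ne _ _ _ _ _ _ one_ne_zero (by decide)]
  rw [show rest.length + 4 = (rest.length + 3) + 1 from rfl, pvGo_step_ne _ _ _ _ _ _ one_ne_zero (by decide)]
  rw [show rest.length + 3 = (rest.length + 2) + 1 from rfl, pvGo_step_ne _ _ _ _ _ _ one_ne_zero (by decide)]
  rw [show rest.length + 2 = (rest.length + 1) + 1 from rfl, pvGo_step_colon _ _ _ _ _ one_ne_zero]
  norm_num
  rw [pvGo_zero]
  rfl

theorem pvStartswith_plan (s : String) (h : PySem.Str.startswith s "plan:" = true) :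
    s.toList = 'p'::'l'::'a'::'n'::':'::(s.toList.drop 5) := by
  rw [PySem.Str.startswith, PySem.Chars.startswith_iff] at h
  obtain ⟨t, ht⟩ := h
  have hs : s.toList = 'p'::'l'::'a'::'n'::':'::t := by simpa using ht.symm
  rw [hs]; rfl

theorem pvSplit_plan (s : String) (h : PySem.Str.startswith s "plan:" = true) :
    PySem.Str.splitMax? s ":" 1 = some ["plan", String.ofList (s.toList.drop 5)] := by
  have hs := pvStartswith_plan s h
  rw [PySem.Str.splitMax?, PySem.Chars.splitMax?, hs]
  have : ('p'::'l'::'a'::'n'::':'::(s.toList.drop 5)).drop 5 = s.toList.drop 5 := rfl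
  simp [pvChars_split, PySem.Str.splitMax?]

theorem pvPlanSuffix_eq (s : String) (h : PySem.Str.startswith s "plan:" = true) :
    pvPlanSuffix s = String.ofList (s.toList.drop 5) := by
  simp [pvPlanSuffix, pvSplit_plan s h]

theorem pvPlanSuffix_inj (s t : String)
    (hs : PySem.Str.startswith s "plan:" = true) (ht : PySem.Str.startswith t "plan:" = true)
    (h : pvPlanSuffix s = pvPlanSuffix t) : s = t := by
  rw [pvPlanSuffix_eq s hs, pvPlanSuffix_eq t ht] at h
  have h' : s.toList.drop 5 = t.toList.drop 5 := by
    have := congrArg String.toList h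
    simpa [String.toList_ofList] using this
  have := pvStartswith_plan s hs
  rw [← String.toList_inj, this, pvStartswith_plan t ht, h']

theorem pvMem_planList_fst {kc : List (String × Int)} {s : String}
    (h : s ∈ (pvPlanList kc).map Prod.fst) :
    ∃ kv, kv ∈ kc ∧ PySem.Str.startswith kv.1 "plan:" = true ∧ pvPlanSuffix kv.1 = s := by
  rw [List.mem_map] at h
  obtain ⟨x, hx, hxs⟩ := h
  rw [pvPlanList, List.mem_filterMap] at hx
  obtain ⟨a, ha, hfa⟩ := hx
  by_cases hp : PySem.Str.startswith a.1 "plan:" = true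
  · rw [if_pos hp] at hfa
    obtain rfl := Option.some.inj hfa
    exact ⟨a, ha, hp, by simpa using hxs⟩
  · rw [if_neg hp] at hfa
    exact absurd hfa (by simp)

theorem pvPlanList_nodup (kc : List (String × Int)) (h : (kc.map Prod.fst).Nodup) :
    ((pvPlanList kc).map Prod.fst).Nodup := by
  induction kc with
  | nil => simp [pvPlanList]
  | cons kv rest ih =>
    simp only [List.map_cons, List.nodup_cons] at h
    by_cases hp : PySem.Str.startswith kv.1 "plan:" = true
    · have hL : pvPlanList (kv :: rest) = (pvPlanSuffix kv.1, kv.2) :: pvPlanList rest := by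
        rw [pvPlanList, pvPlanList, List.filterMap_cons_some (h := by rw [if_pos hp])]
      rw [hL, List.map_cons, List.nodup_cons]
      refine ⟨?_, ih h.2⟩
      intro hmem
      obtain ⟨kv', hkv', hp', hsuf⟩ := pvMem_planList_fst hmem
      have : kv'.1 = kv.1 := pvPlanSuffix_inj kv'.1 kv.1 hp' hp hsuf
      exact h.1 (List.mem_map.mpr ⟨kv', hkv', this⟩)
    · have hL : pvPlanList (kv :: rest) = pvPlanList rest := by
        rw [pvPlanList, pvPlanList, List.filterMap_cons_none (h := by rw [if_neg hp])]
      rw [hL]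
      exact ih h.2

theorem pvContains_eq_false {d : PySem.Dict String Int} {k : String}
    (h : k ∉ d.items.map Prod.fst) : d.contains k = false := by
  rw [PySem.Dict.contains]
  rw [List.any_eq_false]
  intro p hp hbeq
  exact h (List.mem_map.mpr ⟨p, hp, eq_of_beq hbeq⟩)

theorem pvDict_fold_items (kc : List (String × Int)) (d : PySem.Dict String Int)
    (h : (d.items.map Prod.fst ++ (pvPlanList kc).map Prod.fst).Nodup) :
    (kc.foldl
      (fun d kv =>
        if PySem.Str.startswith kv.1 "plan:" then d.insert (pvPlanSuffix kv.1) kv.2 else d)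
      d).items = d.items ++ pvPlanList kc := by
  induction kc generalizing d with
  | nil => simp [pvPlanList]
  | cons kv rest ih =>
    by_cases hp : PySem.Str.startswith kv.1 "plan:" = true
    · have hL : pvPlanList (kv :: rest) = (pvPlanSuffix kv.1, kv.2) :: pvPlanList rest := by
        rw [pvPlanList, pvPlanList, List.filterMap_cons_some (h := by rw [if_pos hp])]
      rw [hL] at h
      have hnotin : pvPlanSuffix kv.1 ∉ d.items.map Prod.fst := by
        intro hmem
        have hin2 : pvPlanSuffix kv.1
            ∈ List.map Prod.fst ((pvPlanSuffix kv.1, kv.2) :: pvPlanList rest) := by simp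
        exact ((List.nodup_append.mp h).2.2 _ hmem _ hin2) rfl
      have hins : (d.insert (pvPlanSuffix kv.1) kv.2).items
          = d.items ++ [(pvPlanSuffix kv.1, kv.2)] := by
        rw [PySem.Dict.insert, pvContains_eq_false hnotin]
        simp
      have h' : ((d.insert (pvPlanSuffix kv.1) kv.2).items.map Prod.fst
          ++ (pvPlanList rest).map Prod.fst).Nodup := by
        rw [hins]
        simpa using h
      rw [List.foldl_cons, if_pos hp, ih _ h', hins, hL]
      simp
    · have hL : pvPlanList (kv :: rest) = pvPlanList rest := by
        rw [pvPlanList, pvPlanList, List.filterMap_cons_none (h := by rw [if_neg hp])]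
      rw [hL] at h
      rw [List.foldl_cons, if_neg hp, hL]
      exact ih d h

theorem pvAlt_fold_planList (kc : List (String × Int)) (st : Option String × Option Int) :
    kc.foldl
      (fun st kv =>
        if PySem.Str.startswith kv.1 "plan:" then
          match st.2 with
          | none => (some (pvPlanSuffix kv.1), some kv.2)
          | some b => if kv.2 > b then (some (pvPlanSuffix kv.1), some kv.2) else st
        else st) st
    = (pvPlanList kc).foldl
        (fun st rv =>
          match st.2 with
          | none => (some rv.1, some rv.2)
          | some b => if rv.2 > b then (some rv.1, some rv.2) else st) st := by
  induction kc generalizing st with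
  | nil => rfl
  | cons kv rest ih =>
    by_cases hp : PySem.Str.startswith kv.1 "plan:" = true
    · rw [List.foldl_cons, if_pos hp, pvPlanList,
        List.filterMap_cons_some (h := by rw [if_pos hp]), List.foldl_cons]
      rw [pvPlanList] at ih
      exact ih _
    · rw [List.foldl_cons, if_neg hp, pvPlanList,
        List.filterMap_cons_none (h := by rw [if_neg hp])]
      rw [pvPlanList] at ih
      exact ih st

def pvMaxStep (acc : Option (String × Int)) (x : String × Int) : Option (String × Int) :=
  match acc with
  | none => some x
  | some mm => if mm.2 < x.2 then some x else some mm

theorem pvMax?_eq_foldl (L : List (String × Int)) :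
    PySem.List.max? L (fun item => item.2) = L.foldl pvMaxStep none := by
  unfold PySem.List.max?
  congr 1
  funext acc x
  cases acc <;> rfl

theorem pvBest_eq_max (L : List (String × Int)) (m : Option (String × Int)) :
    L.foldl
      (fun st rv =>
        match st.2 with
        | none => (some rv.1, some rv.2)
        | some b => if rv.2 > b then (some rv.1, some rv.2) else st)
      (m.map Prod.fst, m.map Prod.snd)
    = ((L.foldl pvMaxStep m).map Prod.fst, (L.foldl pvMaxStep m).map Prod.snd) := by
  induction L generalizing m with
  | nil => rfl
  | cons x t ih =>
    cases m with
    | none =>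
      simpa [pvMaxStep] using ih (some x)
    | some mm =>
      simp only [List.foldl_cons, Option.map_some, pvMaxStep]
      by_cases hlt : mm.2 < x.2
      · have hgt : x.2 > mm.2 := hlt
        simpa [pvMaxStep, hlt, hgt] using ih (some x)
      · have hgt : ¬ x.2 > mm.2 := hlt
        simpa [pvMaxStep, hlt, hgt] using ih (some mm)

-- ===== VERDICT (by name: the statement is the Claim_ definition above) =====
theorem page_role_from_keyword_counts_py_spec : Claim_equal_page_role_from_keyword_counts_py := by
  intro kc _ hpre
  unfold Spec_page_role_from_keyword_counts_py
  simp only [page_role_from_keyword_counts_py, page_role_from_keyword_counts_py_alt]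
  have hitems :
      (kc.foldl
        (fun d kv =>
          if PySem.Str.startswith kv.1 "plan:" then d.insert (pvPlanSuffix kv.1) kv.2 else d)
        PySem.Dict.empty).items = pvPlanList kc := by
    have h := pvDict_fold_items kc PySem.Dict.empty
      (by simpa [PySem.Dict.empty] using pvPlanList_nodup kc hpre)
    simpa [PySem.Dict.empty] using h
  rw [hitems]
  rw [pvAlt_fold_planList kc (none, none)]
  have hbest := pvBest_eq_max (pvPlanList kc) none
  simp only [Option.map_none] at hbest
  rw [hbest]
  rw [pvMax?_eq_foldl]
  cases hM : (pvPlanList kc).foldl pvMaxStep (none : Option (String × Int)) with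
  | none =>
    have hnil : pvPlanList kc = [] := by
      rw [← PySem.List.max?_eq_none_iff (pvPlanList kc) (fun item => item.2), pvMax?_eq_foldl]
      exact hM
    simp [hnil, hM]
  | some m =>
    have hne : pvPlanList kc ≠ [] := by
      intro hnil
      rw [hnil] at hM
      simp at hM
    rw [if_neg hne]
    rcases m with ⟨r, s⟩
    simp
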